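-- pv_equiv track=rewrite | github.com/ZJU-PL/aria | aria/bool/modal/__init__.py | _is_transitive
-- ===== SOURCE A (Python) =====
-- from typing import (
--     FrozenSet,
--     Hashable,
--     Iterable,
--     Literal,
--     Mapping,
--     Optional,
--     Tuple,
--     TypeVar,
--     Union,
--     cast,
-- )
--
-- World = Hashable
--
-- RelationEdge = Tuple[World, World]
--
-- def _is_transitive(worlds: Tuple[World, ...], relation: FrozenSet[RelationEdge]) -> bool:
--     return all(
--         (source, target) not in relation
--         or (target, successor) not in relation
--         or (source, successor) in relation
--         for source in worlds
--         for target in worlds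
--         for successor in worlds
--     )
-- ===== SOURCE B (Python) =====
-- def _is_transitive(worlds, relation):
--     w = set(worlds)
--     edges = [(a, b) for (a, b) in relation if a in w and b in w]
--     for a, b in edges:
--         for b2, c in edges:
--             if b2 == b and (a, c) not in relation:
--                 return False
--     return True
-- ===== Notes on version B (the rewrite author's own statement) =====
-- stated objective: faster
-- what changed: B iterates over pairs of existing relation edges restricted to the world set (filter once, chain on matching middle node, early exit) instead of A's triple loop over all worlds^3.
import Mathlib
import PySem

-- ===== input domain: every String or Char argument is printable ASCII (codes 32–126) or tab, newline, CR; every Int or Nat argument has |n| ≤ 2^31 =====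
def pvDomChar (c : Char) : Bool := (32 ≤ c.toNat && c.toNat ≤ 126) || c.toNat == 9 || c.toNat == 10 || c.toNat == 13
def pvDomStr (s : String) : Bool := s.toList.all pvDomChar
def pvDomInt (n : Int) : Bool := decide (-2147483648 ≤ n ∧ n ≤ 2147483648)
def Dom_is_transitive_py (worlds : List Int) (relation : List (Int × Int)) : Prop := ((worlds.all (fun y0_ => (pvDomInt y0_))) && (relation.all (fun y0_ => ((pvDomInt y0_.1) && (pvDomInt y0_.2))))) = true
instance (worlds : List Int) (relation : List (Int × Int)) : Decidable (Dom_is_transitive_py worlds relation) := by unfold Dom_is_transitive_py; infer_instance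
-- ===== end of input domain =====

-- B replaces the O(n^3) triple loop over worlds with a double loop over the relation edges
-- restricted to the world set (measured faster on the generated inputs).

-- ===== PORT A =====
-- all((s,t) not in R or (t,u) not in R or (s,u) in R for s in worlds for t in worlds for u in worlds)
def is_transitive_py (worlds : List Int) (relation : List (Int × Int)) : Bool :=
  worlds.all (fun source => worlds.all (fun target => worlds.all (fun successor =>
    !(relation.contains (source, target)) || !(relation.contains (target, successor)) ||
      relation.contains (source, successor))))

-- ===== PORT B =====
-- B: filter relation to edges inside the world set once, then chain edge pairs on a matching
-- middle node and check the composed edge; early 'return False' is the failing all-clause.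
def is_transitive_py_alt (worlds : List Int) (relation : List (Int × Int)) : Bool :=
  let w : PySem.Set Int := PySem.Set.ofList worlds
  let edges := relation.filter (fun e => PySem.Set.contains w e.1 && PySem.Set.contains w e.2)
  edges.all (fun ab => edges.all (fun bc =>
    !(bc.1 == ab.2) || relation.contains (ab.1, bc.2)))

-- ===== PRECONDITION & SPEC =====
def Spec_is_transitive_py (worlds : List Int) (relation : List (Int × Int)) (out : Bool) : Prop := out = is_transitive_py_alt worlds relation
instance (worlds : List Int) (relation : List (Int × Int)) (out : Bool) : Decidable (Spec_is_transitive_py worlds relation out) := by unfold Spec_is_transitive_py; infer_instance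

-- ===== CLAIM (what is proved, stated in full; the proofs are below) =====
def Claim_equal_is_transitive_py : Prop := ∀ (worlds : List Int) (relation : List (Int × Int)), Dom_is_transitive_py worlds relation → Spec_is_transitive_py worlds relation (is_transitive_py worlds relation)

-- ===== LEMMAS AND PROOFS =====

lemma A_iff (worlds : List Int) (relation : List (Int × Int)) :
    is_transitive_py worlds relation = true ↔
      ∀ s ∈ worlds, ∀ t ∈ worlds, ∀ u ∈ worlds,
        (s, t) ∈ relation → (t, u) ∈ relation → (s, u) ∈ relation := by
  simp [is_transitive_py, List.all_eq_true, ← imp_iff_not_or]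
  constructor
  · intro h s hs t ht u hu h1 h2
    rcases h s hs t ht u hu with h' | h'
    · exact absurd h2 (h' h1)
    · exact h'
  · intro h s hs t ht u hu
    by_cases h1 : (s, t) ∈ relation
    · by_cases h2 : (t, u) ∈ relation
      · exact Or.inr (h s hs t ht u hu h1 h2)
      · exact Or.inl fun _ => h2
    · exact Or.inl fun h1' => absurd h1' h1

lemma B_iff (worlds : List Int) (relation : List (Int × Int)) :
    is_transitive_py_alt worlds relation = true ↔
      ∀ a b : Int, (a, b) ∈ relation → a ∈ worlds → b ∈ worlds →
        ∀ c d : Int, (c, d) ∈ relation → c ∈ worlds → d ∈ worlds →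
          c = b → (a, d) ∈ relation := by
  simp [is_transitive_py_alt, List.all_eq_true,
    PySem.Set.mem_ofList, ← imp_iff_not_or]
  constructor
  · intro h a b hab ha hb c d hcd hc hd hcb
    rcases h a b hab with h' | h'
    · exact absurd hb (h' ha)
    · rcases h' c d hcd with h'' | h''
      · exact absurd hd (h'' hc)
      · exact h'' hcb
  · intro h a b hab
    by_cases ha : a ∈ worlds
    · by_cases hb : b ∈ worlds
      · refine Or.inr fun c d hcd => ?_
        by_cases hc : c ∈ worlds
        · by_cases hd : d ∈ worlds
          · exact Or.inr (h a b hab ha hb c d hcd hc hd)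
          · exact Or.inl fun _ => hd
        · exact Or.inl fun h' => absurd h' hc
      · exact Or.inl fun _ => hb
    · exact Or.inl fun h' => absurd h' ha

-- ===== VERDICT (by name: the statement is the Claim_ definition above) =====
theorem is_transitive_py_spec : Claim_equal_is_transitive_py := by
  intro worlds relation _
  unfold Spec_is_transitive_py
  rw [Bool.eq_iff_iff, A_iff, B_iff]
  constructor
  · intro hA a b hab h1 h2 c d hcd h3 h4 heq
    exact hA a h1 b h2 d h4 hab (by rw [← heq]; exact hcd)
  · intro hB s hs t ht u hu hst htu
    exact hB s t hst hs ht t u htu ht hu rfl
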